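-- pv_equiv track=rewrite | github.com/paiml/depyler | examples/hard_matrix_linear_algebra.py | mat_swap_rows
-- ===== SOURCE A (Python) =====
-- def mat_copy(a: list[list[int]]) -> list[list[int]]:
--     """Create a deep copy of a matrix."""
--     rows: int = len(a)
--     cols: int = len(a[0])
--     result: list[list[int]] = []
--     for i in range(rows):
--         row: list[int] = []
--         for j in range(cols):
--             row.append(a[i][j])
--         result.append(row)
--     return result
--
-- def mat_swap_rows(a: list[list[int]], r1: int, r2: int) -> list[list[int]]:
--     """Swap two rows in a matrix, returning a new matrix."""
--     result: list[list[int]] = mat_copy(a)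
--     cols: int = len(a[0])
--     for j in range(cols):
--         tmp: int = result[r1][j]
--         result[r1][j] = result[r2][j]
--         result[r2][j] = tmp
--     return result
-- ===== SOURCE B (Python) =====
-- def mat_swap_rows(a: list[list[int]], r1: int, r2: int) -> list[list[int]]:
--     """Swap two rows in a matrix, returning a new matrix (column-major version)."""
--     out = [[] for _ in a]
--     for j in range(len(a[0])):
--         col = [row[j] for row in a]
--         col[r1], col[r2] = col[r2], col[r1]
--         out = [r + [x] for r, x in zip(out, col)]
--     return out
-- ===== Notes on version B (the rewrite author's own statement) =====
-- stated objective: alternative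
-- what changed: Instead of deep-copying the matrix row by row and then swapping the two rows element by element in place, B traverses the matrix column-major: for each column it extracts the column vector, swaps its two entries, and appends the column onto the rows of the output being built.
import Mathlib
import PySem

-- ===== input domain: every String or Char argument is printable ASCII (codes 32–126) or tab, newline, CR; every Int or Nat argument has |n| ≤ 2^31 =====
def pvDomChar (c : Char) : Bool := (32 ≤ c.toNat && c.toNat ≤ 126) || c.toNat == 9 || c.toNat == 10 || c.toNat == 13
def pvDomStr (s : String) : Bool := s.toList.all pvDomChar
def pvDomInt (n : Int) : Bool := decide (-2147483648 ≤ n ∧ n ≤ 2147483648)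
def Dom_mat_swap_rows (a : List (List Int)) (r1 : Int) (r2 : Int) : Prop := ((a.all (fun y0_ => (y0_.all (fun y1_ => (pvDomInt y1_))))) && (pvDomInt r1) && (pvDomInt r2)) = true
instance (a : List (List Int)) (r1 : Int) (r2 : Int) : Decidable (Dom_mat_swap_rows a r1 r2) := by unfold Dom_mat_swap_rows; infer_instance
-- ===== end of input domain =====

-- B replaces "deep-copy row by row, then swap the two rows element by element in place" with a
-- column-major traversal: extract each column, swap its two entries, append it onto the output
-- rows; same cost, a genuinely different traversal.

-- ===== PORT A =====
-- helper mat_copy from the same module, transliterated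
def pvMatCopy (a : List (List Int)) : List (List Int) :=
  let rows : Int := (a.length : Int)
  let cols : Int := ((PySem.List.pyGetD a 0 []).length : Int)
  (PySem.List.pyRange 0 rows 1).foldl
    (fun result i =>
      result ++ [(PySem.List.pyRange 0 cols 1).foldl
        (fun row j => row ++ [PySem.List.pyGetD (PySem.List.pyGetD a i []) j 0]) []]) []

def mat_swap_rows (a : List (List Int)) (r1 : Int) (r2 : Int) : List (List Int) :=
  let result := pvMatCopy a
  let cols : Int := ((PySem.List.pyGetD a 0 []).length : Int)
  (PySem.List.pyRange 0 cols 1).foldl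
    (fun result j =>
      let tmp : Int := PySem.List.pyGetD (PySem.List.pyGetD result r1 []) j 0
      let result := PySem.List.pySetD result r1
        (PySem.List.pySetD (PySem.List.pyGetD result r1 []) j
          (PySem.List.pyGetD (PySem.List.pyGetD result r2 []) j 0))
      let result := PySem.List.pySetD result r2
        (PySem.List.pySetD (PySem.List.pyGetD result r2 []) j tmp)
      result) result

-- ===== PORT B =====
def mat_swap_rows_alt (a : List (List Int)) (r1 : Int) (r2 : Int) : List (List Int) :=
  let out0 := a.map (fun _ => ([] : List Int))
  (PySem.List.pyRange 0 (((PySem.List.pyGetD a 0 []).length : Nat) : Int) 1).foldl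
    (fun out j =>
      let col := a.map (fun row => PySem.List.pyGetD row j 0)
      let t2 := PySem.List.pyGetD col r2 0
      let t1 := PySem.List.pyGetD col r1 0
      let col := PySem.List.pySetD (PySem.List.pySetD col r1 t2) r2 t1
      (out.zip col).map (fun p => p.1 ++ [p.2])) out0

-- ===== PRECONDITION & SPEC =====
-- Pre_ excludes exactly the inputs on which A raises: the empty matrix, a row shorter than the
-- first row (IndexError in mat_copy), and — only when the first row is non-empty, so the swap
-- loop actually indexes the rows — an out-of-range row index.
def Pre_mat_swap_rows (a : List (List Int)) (r1 : Int) (r2 : Int) : Prop :=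
  a ≠ [] ∧ (∀ r ∈ a, (a.getD 0 []).length ≤ r.length) ∧
    ((a.getD 0 []).length = 0 ∨
      (PySem.Raise.InRange a.length r1 ∧ PySem.Raise.InRange a.length r2))
instance (a : List (List Int)) (r1 : Int) (r2 : Int) : Decidable (Pre_mat_swap_rows a r1 r2) := by
  unfold Pre_mat_swap_rows PySem.Raise.InRange; infer_instance

def pvWitness_mat_swap_rows : List (List Int) × Int × Int := ([[1, 2], [3, 4], [5, 6]], 0, -1)

def Spec_mat_swap_rows (a : List (List Int)) (r1 : Int) (r2 : Int) (out : List (List Int)) : Prop := out = mat_swap_rows_alt a r1 r2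
instance (a : List (List Int)) (r1 : Int) (r2 : Int) (out : List (List Int)) : Decidable (Spec_mat_swap_rows a r1 r2 out) := by unfold Spec_mat_swap_rows; infer_instance

-- ===== CLAIM (what is proved, stated in full; the proofs are below) =====
def Claim_equal_mat_swap_rows : Prop := ∀ (a : List (List Int)) (r1 : Int) (r2 : Int), Dom_mat_swap_rows a r1 r2 → Pre_mat_swap_rows a r1 r2 → Spec_mat_swap_rows a r1 r2 (mat_swap_rows a r1 r2)

-- ===== LEMMAS AND PROOFS =====

-- normalized (Python-wrapped) index
def pvNorm (n : Nat) (i : Int) : Nat := if 0 ≤ i then i.toNat else n - (-i).toNat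

theorem pvNorm_lt (n : Nat) (i : Int) (h : PySem.Raise.InRange n i) : pvNorm n i < n := by
  unfold PySem.Raise.InRange at h; unfold pvNorm; split <;> omega

theorem pvGetD_norm {α : Type} (xs : List α) (i : Int) (d : α)
    (h : PySem.Raise.InRange xs.length i) :
    PySem.List.pyGetD xs i d = xs.getD (pvNorm xs.length i) d := by
  unfold PySem.Raise.InRange at h
  unfold pvNorm
  simp only [PySem.List.pyGetD, PySem.List.pyGet?, PySem.List.pyIdx?]
  by_cases h0 : 0 ≤ i
  · rw [if_pos h0, if_pos h0, if_pos (by omega)]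
    have hn : i.toNat < xs.length := by omega
    simp [List.getElem?_eq_getElem hn]
  · rw [if_neg h0, if_neg h0, if_pos (by omega)]
    have hn : xs.length - (-i).toNat < xs.length := by omega
    simp [List.getElem?_eq_getElem hn]

theorem pvSetD_norm {α : Type} (xs : List α) (i : Int) (v : α)
    (h : PySem.Raise.InRange xs.length i) :
    PySem.List.pySetD xs i v = xs.set (pvNorm xs.length i) v := by
  unfold PySem.Raise.InRange at h
  unfold pvNorm
  simp only [PySem.List.pySetD, PySem.List.pySet?, PySem.List.pyIdx?]
  by_cases h0 : 0 ≤ i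
  · rw [if_pos h0, if_pos h0, if_pos (by omega)]; simp
  · rw [if_neg h0, if_neg h0, if_pos (by omega)]; simp

-- setting a nonnegative index to its own current value is the identity
theorem pvSetGetSelf {α : Type} (xs : List α) (j : Int) (d : α) (hj : 0 ≤ j) :
    PySem.List.pySetD xs j (PySem.List.pyGetD xs j d) = xs := by
  simp only [PySem.List.pySetD, PySem.List.pySet?, PySem.List.pyGetD, PySem.List.pyGet?,
    PySem.List.pyIdx?]
  by_cases hlt : j < (xs.length : Int)
  · have hn : j.toNat < xs.length := by omega
    simp [hj, hlt, List.set_getElem_self]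
  · simp [hj, hlt]

-- [r[j] for j in range(c)] = r.take c  when c ≤ len r
theorem pvTakeMapRange (r : List Int) (c : Nat) (h : c ≤ r.length) :
    (PySem.List.pyRange 0 (c : Int) 1).map (fun j => PySem.List.pyGetD r j 0) = r.take c := by
  rw [PySem.List.pyRange_one]
  simp only [sub_zero, Int.toNat_natCast, List.map_map]
  apply List.ext_getElem
  · simp only [List.length_map, List.length_range, List.length_take]; omega
  · intro i h1 h2
    simp only [List.getElem_map, List.getElem_range, Function.comp_apply, List.getElem_take]
    have e : (0 : Int) + (i : Int) = (i : Int) := by ring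
    rw [e, PySem.List.pyGetD_natCast]
    rw [List.getD_eq_getElem r 0 (by simp only [List.length_map, List.length_range] at h1; omega)]

-- reading the boundary element of a partially swapped row
theorem pvMixGet (u v : List Int) (k : Nat) (hu : k ≤ u.length) (hv : k < v.length) :
    (u.take k ++ v.drop k).getD k 0 = v[k] := by
  have hlen : (u.take k).length = k := by simp [Nat.min_eq_left hu]
  have h1 : k < (u.take k ++ v.drop k).length := by simp; omega
  rw [List.getD_eq_getElem _ _ h1, List.getElem_append_right (by omega)]
  simp [hlen, List.getElem_drop]

-- writing the boundary element advances the partial swap by one column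
theorem pvMixSet (u v : List Int) (k : Nat) (hu : k < u.length) (hv : k < v.length) :
    (u.take k ++ v.drop k).set k (u[k]) = u.take (k + 1) ++ v.drop (k + 1) := by
  have hlen : (u.take k).length = k := by simp [Nat.min_eq_left (le_of_lt hu)]
  have hdrop : (v.drop k).set 0 (u[k]) = u[k] :: v.drop (k + 1) := by
    rw [List.drop_eq_getElem_cons hv]; rfl
  have htake : u.take (k + 1) = u.take k ++ [u[k]] := by
    rw [List.take_add_one, List.getElem?_eq_getElem hu]; rfl
  rw [List.set_append_right k _ (by omega), hlen, Nat.sub_self, hdrop, htake,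
    List.append_assoc]
  rfl

-- one iteration of A's element-swap loop advances the partial swap by one column
theorem pvStepEq (D : List (List Int)) (r1 r2 : Int) (u v : List Int) (k : Nat)
    (h1 : PySem.Raise.InRange D.length r1) (h2 : PySem.Raise.InRange D.length r2)
    (hne : pvNorm D.length r1 ≠ pvNorm D.length r2)
    (hku : k < u.length) (hkv : k < v.length) :
    (fun (result : List (List Int)) (j : Int) =>
        let tmp : Int := PySem.List.pyGetD (PySem.List.pyGetD result r1 []) j 0
        let result := PySem.List.pySetD result r1
          (PySem.List.pySetD (PySem.List.pyGetD result r1 []) j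
            (PySem.List.pyGetD (PySem.List.pyGetD result r2 []) j 0))
        let result := PySem.List.pySetD result r2
          (PySem.List.pySetD (PySem.List.pyGetD result r2 []) j tmp)
        result)
      ((D.set (pvNorm D.length r1) (v.take k ++ u.drop k)).set (pvNorm D.length r2)
        (u.take k ++ v.drop k)) (k : Int)
    = (D.set (pvNorm D.length r1) (v.take (k + 1) ++ u.drop (k + 1))).set (pvNorm D.length r2)
        (u.take (k + 1) ++ v.drop (k + 1)) := by
  have hi1 : pvNorm D.length r1 < D.length := pvNorm_lt _ _ h1
  have hi2 : pvNorm D.length r2 < D.length := pvNorm_lt _ _ h2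
  simp only []
  have hget1 : PySem.List.pyGetD
      ((D.set (pvNorm D.length r1) (v.take k ++ u.drop k)).set (pvNorm D.length r2)
        (u.take k ++ v.drop k)) r1 [] = v.take k ++ u.drop k := by
    rw [pvGetD_norm _ r1 [] (by simp only [List.length_set]; exact h1)]
    simp only [List.length_set]
    rw [List.getD_eq_getElem _ [] (by simp only [List.length_set]; exact hi1),
      List.getElem_set_ne (Ne.symm hne), List.getElem_set_self]
  have hget2 : PySem.List.pyGetD
      ((D.set (pvNorm D.length r1) (v.take k ++ u.drop k)).set (pvNorm D.length r2)
        (u.take k ++ v.drop k)) r2 [] = u.take k ++ v.drop k := by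
    rw [pvGetD_norm _ r2 [] (by simp only [List.length_set]; exact h2)]
    simp only [List.length_set]
    rw [List.getD_eq_getElem _ [] (by simp only [List.length_set]; exact hi2),
      List.getElem_set_self]
  rw [hget1, hget2]
  simp only [PySem.List.pyGetD_natCast, PySem.List.pySetD_natCast]
  rw [pvMixGet v u k (le_of_lt hkv) hku, pvMixGet u v k (le_of_lt hku) hkv]
  rw [pvMixSet v u k hkv hku]
  rw [pvSetD_norm _ r1 _ (by simp only [List.length_set]; exact h1)]
  simp only [List.length_set]
  have hget3 : PySem.List.pyGetD
      (((D.set (pvNorm D.length r1) (v.take k ++ u.drop k)).set (pvNorm D.length r2)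
        (u.take k ++ v.drop k)).set (pvNorm D.length r1)
        (v.take (k + 1) ++ u.drop (k + 1))) r2 [] = u.take k ++ v.drop k := by
    rw [pvGetD_norm _ r2 [] (by simp only [List.length_set]; exact h2)]
    simp only [List.length_set]
    rw [List.getD_eq_getElem _ [] (by simp only [List.length_set]; exact hi2),
      List.getElem_set_ne hne, List.getElem_set_self]
  rw [hget3]
  rw [pvMixSet u v k hku hkv]
  rw [pvSetD_norm _ r2 _ (by simp only [List.length_set]; exact h2)]
  simp only [List.length_set]
  rw [List.set_comm _ _ (Ne.symm hne), List.set_set, List.set_set]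

-- the element-swap loop, unequal normalized indices: partial-swap invariant
theorem pvSwapFold (C : List (List Int)) (r1 r2 : Int) (cols : Nat)
    (h1 : PySem.Raise.InRange C.length r1) (h2 : PySem.Raise.InRange C.length r2)
    (hne : pvNorm C.length r1 ≠ pvNorm C.length r2)
    (hr : ∀ r ∈ C, r.length = cols) (k : Nat) (hk : k ≤ cols) :
    (PySem.List.pyRange 0 (k : Int) 1).foldl
      (fun result j =>
        let tmp : Int := PySem.List.pyGetD (PySem.List.pyGetD result r1 []) j 0
        let result := PySem.List.pySetD result r1
          (PySem.List.pySetD (PySem.List.pyGetD result r1 []) j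
            (PySem.List.pyGetD (PySem.List.pyGetD result r2 []) j 0))
        let result := PySem.List.pySetD result r2
          (PySem.List.pySetD (PySem.List.pyGetD result r2 []) j tmp)
        result) C
    = (C.set (pvNorm C.length r1)
          ((C.getD (pvNorm C.length r2) []).take k ++ (C.getD (pvNorm C.length r1) []).drop k)).set
        (pvNorm C.length r2)
          ((C.getD (pvNorm C.length r1) []).take k ++ (C.getD (pvNorm C.length r2) []).drop k) := by
  have hi1 : pvNorm C.length r1 < C.length := pvNorm_lt _ _ h1
  have hi2 : pvNorm C.length r2 < C.length := pvNorm_lt _ _ h2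
  have hR1 : (C.getD (pvNorm C.length r1) []).length = cols := by
    rw [List.getD_eq_getElem C [] hi1]; exact hr _ (List.getElem_mem hi1)
  have hR2 : (C.getD (pvNorm C.length r2) []).length = cols := by
    rw [List.getD_eq_getElem C [] hi2]; exact hr _ (List.getElem_mem hi2)
  revert hk
  induction k with
  | zero =>
    intro _
    rw [Nat.cast_zero, PySem.List.pyRange_one_eq_nil le_rfl]
    simp only [List.foldl_nil, List.take_zero, List.drop_zero, List.nil_append]
    rw [List.getD_eq_getElem C [] hi1, List.getD_eq_getElem C [] hi2]
    rw [List.set_getElem_self, List.set_getElem_self]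
  | succ k ih =>
    intro hk
    rw [show ((k + 1 : Nat) : Int) = (k : Int) + 1 by push_cast; ring]
    rw [PySem.List.pyRange_one_succ_right (by positivity), List.foldl_append,
      ih (by omega), List.foldl_cons, List.foldl_nil]
    exact pvStepEq C r1 r2 (C.getD (pvNorm C.length r1) []) (C.getD (pvNorm C.length r2) [])
      k h1 h2 hne (by omega) (by omega)

-- the element-swap loop, equal normalized indices: identity
theorem pvSwapFoldEq (C : List (List Int)) (r1 r2 : Int)
    (h1 : PySem.Raise.InRange C.length r1) (h2 : PySem.Raise.InRange C.length r2)
    (heq : pvNorm C.length r1 = pvNorm C.length r2) (l : List Int)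
    (hl : ∀ j ∈ l, 0 ≤ j) :
    l.foldl
      (fun result j =>
        let tmp : Int := PySem.List.pyGetD (PySem.List.pyGetD result r1 []) j 0
        let result := PySem.List.pySetD result r1
          (PySem.List.pySetD (PySem.List.pyGetD result r1 []) j
            (PySem.List.pyGetD (PySem.List.pyGetD result r2 []) j 0))
        let result := PySem.List.pySetD result r2
          (PySem.List.pySetD (PySem.List.pyGetD result r2 []) j tmp)
        result) C = C := by
  induction l with
  | nil => simp
  | cons j l ih =>
    have hj : 0 ≤ j := hl j (by simp)
    have hi1 : pvNorm C.length r1 < C.length := pvNorm_lt _ _ h1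
    rw [List.foldl_cons]
    simp only []
    have hgeq : PySem.List.pyGetD C r2 [] = PySem.List.pyGetD C r1 [] := by
      rw [pvGetD_norm C r1 [] h1, pvGetD_norm C r2 [] h2, heq]
    have hi2 : pvNorm C.length r2 < C.length := pvNorm_lt _ _ h2
    have hsetself : PySem.List.pySetD C r1 (PySem.List.pyGetD C r1 []) = C := by
      rw [pvGetD_norm C r1 [] h1, pvSetD_norm C r1 _ h1,
        List.getD_eq_getElem C [] hi1, List.set_getElem_self]
    have hsetself2 : PySem.List.pySetD C r2 (PySem.List.pyGetD C r2 []) = C := by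
      rw [pvGetD_norm C r2 [] h2, pvSetD_norm C r2 _ h2,
        List.getD_eq_getElem C [] hi2, List.set_getElem_self]
    have e1 : PySem.List.pySetD (PySem.List.pyGetD C r1 []) j
        (PySem.List.pyGetD (PySem.List.pyGetD C r2 []) j 0) = PySem.List.pyGetD C r1 [] := by
      rw [hgeq]; exact pvSetGetSelf _ j _ hj
    rw [e1, hsetself]
    have e2 : PySem.List.pySetD (PySem.List.pyGetD C r2 []) j
        (PySem.List.pyGetD (PySem.List.pyGetD C r1 []) j 0) = PySem.List.pyGetD C r2 [] := by
      rw [← hgeq]; exact pvSetGetSelf _ j _ hj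
    rw [e2, hsetself2]
    exact ih (fun x hx => hl x (List.mem_cons_of_mem _ hx))

-- mat_copy = truncate every row to the length of the first row
theorem pvMatCopy_eq (a : List (List Int)) (h : ∀ r ∈ a, (a.getD 0 []).length ≤ r.length) :
    pvMatCopy a = a.map (fun r => r.take (a.getD 0 []).length) := by
  simp only [pvMatCopy, PySem.List.pyGetD_zero]
  have hinner : ∀ i : Int,
      (PySem.List.pyRange 0 (((a.getD 0 []).length : Nat) : Int) 1).foldl
        (fun row j => row ++ [PySem.List.pyGetD (PySem.List.pyGetD a i []) j 0]) []
      = (PySem.List.pyRange 0 (((a.getD 0 []).length : Nat) : Int) 1).map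
        (fun j => PySem.List.pyGetD (PySem.List.pyGetD a i []) j 0) := by
    intro i
    rw [PySem.List.foldl_append_singleton_eq_map, List.nil_append]
  simp only [hinner]
  rw [PySem.List.foldl_append_singleton_eq_map, List.nil_append]
  apply List.ext_getElem
  · simp only [List.length_map, PySem.List.length_pyRange_one]; omega
  · intro m hm1 hm2
    have hm : m < a.length := by
      simp only [List.length_map, PySem.List.length_pyRange_one] at hm1; omega
    simp only [List.getElem_map, PySem.List.getElem_pyRange_one, zero_add]
    rw [PySem.List.pyGetD_natCast, List.getD_eq_getElem a [] hm]
    exact pvTakeMapRange (a[m]) _ (h _ (List.getElem_mem hm))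

-- A's final value in closed form (non-degenerate case)
theorem pvA_eq (a : List (List Int)) (r1 r2 : Int)
    (hrows : ∀ r ∈ a, (a.getD 0 []).length ≤ r.length)
    (h1 : PySem.Raise.InRange a.length r1) (h2 : PySem.Raise.InRange a.length r2) :
    mat_swap_rows a r1 r2 =
      ((a.map (fun r => r.take (a.getD 0 []).length)).set (pvNorm a.length r1)
        ((a.map (fun r => r.take (a.getD 0 []).length)).getD (pvNorm a.length r2) [])).set
        (pvNorm a.length r2)
        ((a.map (fun r => r.take (a.getD 0 []).length)).getD (pvNorm a.length r1) []) := by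
  set C := a.map (fun r => r.take (a.getD 0 []).length) with hC
  have hClen : C.length = a.length := by rw [hC]; simp
  have hCrows : ∀ r ∈ C, r.length = (a.getD 0 []).length := by
    intro r hr
    rw [hC] at hr
    obtain ⟨x, hx, rfl⟩ := List.mem_map.mp hr
    have := hrows x hx
    simp only [List.length_take]
    omega
  have h1' : PySem.Raise.InRange C.length r1 := by rw [hClen]; exact h1
  have h2' : PySem.Raise.InRange C.length r2 := by rw [hClen]; exact h2
  simp only [mat_swap_rows, PySem.List.pyGetD_zero]
  rw [pvMatCopy_eq a hrows, ← hC]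
  by_cases heq : pvNorm C.length r1 = pvNorm C.length r2
  · rw [pvSwapFoldEq C r1 r2 h1' h2' heq _
      (fun j hj => (PySem.List.mem_pyRange_one.mp hj).1)]
    have heq' : pvNorm a.length r1 = pvNorm a.length r2 := by rwa [hClen] at heq
    rw [heq']
    have hi2 : pvNorm a.length r2 < C.length := by rw [hClen]; exact pvNorm_lt _ _ h2
    rw [List.getD_eq_getElem C [] hi2, List.set_getElem_self, List.set_getElem_self]
  · rw [pvSwapFold C r1 r2 (a.getD 0 []).length h1' h2' heq hCrows _ le_rfl]
    have hi1 : pvNorm C.length r1 < C.length := pvNorm_lt _ _ h1'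
    have hi2 : pvNorm C.length r2 < C.length := pvNorm_lt _ _ h2'
    have hR1 : (C.getD (pvNorm C.length r1) []).length = (a.getD 0 []).length := by
      rw [List.getD_eq_getElem C [] hi1]; exact hCrows _ (List.getElem_mem hi1)
    have hR2 : (C.getD (pvNorm C.length r2) []).length = (a.getD 0 []).length := by
      rw [List.getD_eq_getElem C [] hi2]; exact hCrows _ (List.getElem_mem hi2)
    rw [List.take_of_length_le (le_of_eq hR2), List.take_of_length_le (le_of_eq hR1)]
    rw [List.drop_eq_nil_of_le (le_of_eq hR1), List.drop_eq_nil_of_le (le_of_eq hR2)]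
    rw [List.append_nil, List.append_nil, hClen]

-- the matrix with the two (normalized-index) rows exchanged, untruncated
def pvS (a : List (List Int)) (r1 r2 : Int) : List (List Int) :=
  (a.set (pvNorm a.length r1) (a.getD (pvNorm a.length r2) [])).set (pvNorm a.length r2)
    (a.getD (pvNorm a.length r1) [])

theorem pvS_length (a : List (List Int)) (r1 r2 : Int) : (pvS a r1 r2).length = a.length := by
  simp [pvS]

theorem pvS_rows (a : List (List Int)) (r1 r2 : Int) (c : Nat)
    (h1 : PySem.Raise.InRange a.length r1) (h2 : PySem.Raise.InRange a.length r2)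
    (hrows : ∀ r ∈ a, c ≤ r.length) : ∀ r ∈ pvS a r1 r2, c ≤ r.length := by
  have hi1 : pvNorm a.length r1 < a.length := pvNorm_lt _ _ h1
  have hi2 : pvNorm a.length r2 < a.length := pvNorm_lt _ _ h2
  intro r hr
  obtain ⟨m, hm, rfl⟩ := List.mem_iff_getElem.mp hr
  simp only [pvS, List.length_set] at hm ⊢
  by_cases hc2 : m = pvNorm a.length r2
  · subst hc2
    rw [List.getElem_set_self, List.getD_eq_getElem a [] hi1]
    exact hrows _ (List.getElem_mem hi1)
  · rw [List.getElem_set_ne (Ne.symm hc2)]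
    by_cases hc1 : m = pvNorm a.length r1
    · subst hc1
      rw [List.getElem_set_self, List.getD_eq_getElem a [] hi2]
      exact hrows _ (List.getElem_mem hi2)
    · rw [List.getElem_set_ne (Ne.symm hc1)]
      exact hrows _ (List.getElem_mem hm)

-- swapping the two entries of a column = taking the column of the row-swapped matrix
theorem pvColSwap (a : List (List Int)) (r1 r2 : Int) (f : List Int → Int)
    (h1 : PySem.Raise.InRange a.length r1) (h2 : PySem.Raise.InRange a.length r2) :
    PySem.List.pySetD
      (PySem.List.pySetD (a.map f) r1 (PySem.List.pyGetD (a.map f) r2 0)) r2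
      (PySem.List.pyGetD (a.map f) r1 0)
    = (pvS a r1 r2).map f := by
  have hi1 : pvNorm a.length r1 < a.length := pvNorm_lt _ _ h1
  have hi2 : pvNorm a.length r2 < a.length := pvNorm_lt _ _ h2
  have hlen : (a.map f).length = a.length := by simp
  have hg1 : PySem.List.pyGetD (a.map f) r1 0 = f (a.getD (pvNorm a.length r1) []) := by
    rw [pvGetD_norm _ r1 0 (by rw [hlen]; exact h1), hlen,
      List.getD_eq_getElem _ 0 (by simp [hi1]), List.getElem_map,
      List.getD_eq_getElem a [] hi1]
  have hg2 : PySem.List.pyGetD (a.map f) r2 0 = f (a.getD (pvNorm a.length r2) []) := by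
    rw [pvGetD_norm _ r2 0 (by rw [hlen]; exact h2), hlen,
      List.getD_eq_getElem _ 0 (by simp [hi2]), List.getElem_map,
      List.getD_eq_getElem a [] hi2]
  rw [hg1, hg2, pvSetD_norm _ r1 _ (by rw [hlen]; exact h1),
    pvSetD_norm _ r2 _ (by simp [hlen]; exact h2)]
  simp only [List.length_set, hlen, pvS, List.map_set]

-- appending the next column entry extends every truncated row by one
theorem pvZipStep (S : List (List Int)) (k : Nat) (h : ∀ r ∈ S, k < r.length) :
    ((S.map (fun r => r.take k)).zip
        (S.map (fun r => PySem.List.pyGetD r ((k : Nat) : Int) 0))).map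
      (fun p => p.1 ++ [p.2])
    = S.map (fun r => r.take (k + 1)) := by
  induction S with
  | nil => rfl
  | cons r S ih =>
    have hk : k < r.length := h r (by simp)
    simp only [List.map_cons, List.zip_cons_cons]
    rw [ih (fun x hx => h x (List.mem_cons_of_mem _ hx))]
    congr 1
    rw [PySem.List.pyGetD_natCast, List.getD_eq_getElem r 0 hk, List.take_add_one,
      List.getElem?_eq_getElem hk]
    rfl

-- B's column loop invariant: after k columns, every output row is the first k entries of the
-- corresponding row of the swapped matrix
theorem pvB_fold (a : List (List Int)) (r1 r2 : Int) (cols : Nat)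
    (h1 : PySem.Raise.InRange a.length r1) (h2 : PySem.Raise.InRange a.length r2)
    (hrows : ∀ r ∈ a, cols ≤ r.length) (k : Nat) (hk : k ≤ cols) :
    (PySem.List.pyRange 0 (k : Int) 1).foldl
      (fun out j =>
        let col := a.map (fun row => PySem.List.pyGetD row j 0)
        let t2 := PySem.List.pyGetD col r2 0
        let t1 := PySem.List.pyGetD col r1 0
        let col := PySem.List.pySetD (PySem.List.pySetD col r1 t2) r2 t1
        (out.zip col).map (fun p => p.1 ++ [p.2]))
      (a.map (fun _ => ([] : List Int)))
    = (pvS a r1 r2).map (fun r => r.take k) := by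
  induction k with
  | zero =>
    rw [Nat.cast_zero, PySem.List.pyRange_one_eq_nil le_rfl]
    simp only [List.foldl_nil, List.take_zero]
    have : a.length = (pvS a r1 r2).length := (pvS_length a r1 r2).symm
    rw [List.map_const', List.map_const', this]
  | succ k ih =>
    rw [show ((k + 1 : Nat) : Int) = (k : Int) + 1 by push_cast; ring]
    rw [PySem.List.pyRange_one_succ_right (by positivity), List.foldl_append,
      ih (by omega), List.foldl_cons, List.foldl_nil]
    simp only []
    rw [pvColSwap a r1 r2 (fun row => PySem.List.pyGetD row ((k : Nat) : Int) 0) h1 h2]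
    exact pvZipStep (pvS a r1 r2) k
      (fun r hr => lt_of_lt_of_le (by omega) (pvS_rows a r1 r2 cols h1 h2 hrows r hr))

-- B's value in the same closed form (non-degenerate case)
theorem pvB_eq (a : List (List Int)) (r1 r2 : Int)
    (hrows : ∀ r ∈ a, (a.getD 0 []).length ≤ r.length)
    (h1 : PySem.Raise.InRange a.length r1) (h2 : PySem.Raise.InRange a.length r2) :
    mat_swap_rows_alt a r1 r2 =
      ((a.map (fun r => r.take (a.getD 0 []).length)).set (pvNorm a.length r1)
        ((a.map (fun r => r.take (a.getD 0 []).length)).getD (pvNorm a.length r2) [])).set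
        (pvNorm a.length r2)
        ((a.map (fun r => r.take (a.getD 0 []).length)).getD (pvNorm a.length r1) []) := by
  have hi1 : pvNorm a.length r1 < a.length := pvNorm_lt _ _ h1
  have hi2 : pvNorm a.length r2 < a.length := pvNorm_lt _ _ h2
  simp only [mat_swap_rows_alt, PySem.List.pyGetD_zero]
  rw [pvB_fold a r1 r2 (a.getD 0 []).length h1 h2 hrows _ le_rfl]
  simp only [pvS, List.map_set]
  congr 1
  · congr 1
    rw [List.getD_eq_getElem a [] hi2,
      List.getD_eq_getElem (a.map _) [] (by simp [hi2]), List.getElem_map]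
  · rw [List.getD_eq_getElem a [] hi1,
      List.getD_eq_getElem (a.map _) [] (by simp [hi1]), List.getElem_map]

-- degenerate case: the first row is empty, both loops run zero columns
theorem pvAB_zero (a : List (List Int)) (hrows : ∀ r ∈ a, (a.getD 0 []).length ≤ r.length)
    (hz : (a.getD 0 []).length = 0) (r1 r2 : Int) :
    mat_swap_rows a r1 r2 = mat_swap_rows_alt a r1 r2 := by
  simp only [mat_swap_rows, mat_swap_rows_alt, PySem.List.pyGetD_zero, hz, Nat.cast_zero,
    PySem.List.pyRange_one_eq_nil le_rfl, List.foldl_nil]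
  rw [pvMatCopy_eq a hrows, hz]
  simp

-- ===== VERDICT (by name: the statement is the Claim_ definition above) =====
theorem mat_swap_rows_spec : Claim_equal_mat_swap_rows := by
  intro a r1 r2 _ hpre
  obtain ⟨hnil, hrows, hcase⟩ := hpre
  unfold Spec_mat_swap_rows
  rcases hcase with hz | ⟨h1, h2⟩
  · exact pvAB_zero a hrows hz r1 r2
  · rw [pvA_eq a r1 r2 hrows h1 h2, pvB_eq a r1 r2 hrows h1 h2]
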